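-- pv_equiv track=rewrite | github.com/MatijaFajfar/MasterMind | model.py | namig
-- ===== SOURCE A (Python) =====
-- PRAV = 'P'
--
-- SKORAJ = 'N'
--
-- NAROBE = 'X'
--
-- def namig(resitev, poskus):
--     namig = ""
--     for n in range(len(str(resitev))):
--         if str(resitev)[n] == poskus[n]:
--             namig += PRAV
--         elif poskus[n] in resitev and resitev[n] != poskus[n]:
--             namig += SKORAJ
--         else:
--             namig += NAROBE
--     sortiran_namig = sorted(namig)
--     sortiran_namig = ' '.join(sortiran_namig)
--     return sortiran_namig
-- ===== SOURCE B (Python) =====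
-- def namig(resitev, poskus):
--     cp = cn = cx = 0
--     for a, b in zip(resitev, poskus):
--         if a == b:
--             cp += 1
--         elif b in resitev:
--             cn += 1
--         else:
--             cx += 1
--     return ' '.join('N' * cn + 'P' * cp + 'X' * cx)
-- ===== Notes on version B (the rewrite author's own statement) =====
-- stated objective: faster
-- what changed: B replaces the string accumulation plus comparison sort with three integer counters over zip(resitev, poskus) and emits 'N'/'P'/'X' runs directly in sorted order (counting sort / tabulation instead of sorted()).
import Mathlib
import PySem

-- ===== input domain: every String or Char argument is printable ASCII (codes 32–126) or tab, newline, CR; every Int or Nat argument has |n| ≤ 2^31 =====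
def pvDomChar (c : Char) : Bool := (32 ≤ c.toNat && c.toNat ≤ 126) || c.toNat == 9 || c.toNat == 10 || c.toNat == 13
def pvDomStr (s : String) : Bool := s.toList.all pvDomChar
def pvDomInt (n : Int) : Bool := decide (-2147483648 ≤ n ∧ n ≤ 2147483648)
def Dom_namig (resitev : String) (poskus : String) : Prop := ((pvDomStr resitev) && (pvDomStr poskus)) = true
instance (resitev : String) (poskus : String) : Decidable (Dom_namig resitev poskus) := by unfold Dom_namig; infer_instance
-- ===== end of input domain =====

-- B replaces A's string accumulation + sorted() with three counters and direct emission
-- of the 'N','P','X' runs in sorted order (counting instead of comparison sort).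


-- ===== PORT A =====
def namig (resitev : String) (poskus : String) : String :=
  let r := resitev.toList
  let p := poskus.toList
  -- namig = ""; for n in range(len(str(resitev))): namig += 'P'/'N'/'X'
  -- (pyGetD is valid under Pre_namig: every index n < len(resitev) ≤ len(poskus))
  let hint := (PySem.List.pyRange 0 r.length 1).foldl (fun acc n =>
    if PySem.List.pyGetD r n ' ' = PySem.List.pyGetD p n ' ' then acc ++ ['P']
    else if PySem.Chars.isIn [PySem.List.pyGetD p n ' '] r
            ∧ PySem.List.pyGetD r n ' ' ≠ PySem.List.pyGetD p n ' ' then acc ++ ['N']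
    else acc ++ ['X']) []
  -- sortiran_namig = sorted(namig); ' '.join(sortiran_namig)
  String.ofList (PySem.Chars.join [' '] ((PySem.List.sorted hint (fun c => c) false).map (fun c => [c])))

-- ===== PORT B =====
def namig_alt (resitev : String) (poskus : String) : String :=
  -- cp, cn, cx counters over zip(resitev, poskus)
  let counts := (resitev.toList.zip poskus.toList).foldl
    (fun (acc : Nat × Nat × Nat) ab =>
      if ab.1 = ab.2 then (acc.1 + 1, acc.2.1, acc.2.2)
      else if PySem.Chars.isIn [ab.2] resitev.toList then (acc.1, acc.2.1 + 1, acc.2.2)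
      else (acc.1, acc.2.1, acc.2.2 + 1)) (0, 0, 0)
  -- ' '.join('N'*cn + 'P'*cp + 'X'*cx)
  String.ofList (PySem.Chars.join [' ']
    ((List.replicate counts.2.1 'N' ++ List.replicate counts.1 'P' ++ List.replicate counts.2.2 'X').map (fun c => [c])))

-- ===== PRECONDITION & SPEC =====
-- A indexes poskus[n] for every n < len(resitev): it raises IndexError when poskus is shorter.
def Pre_namig (resitev : String) (poskus : String) : Prop :=
  resitev.toList.length ≤ poskus.toList.length
instance (resitev : String) (poskus : String) : Decidable (Pre_namig resitev poskus) := by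
  unfold Pre_namig; infer_instance
def pvWitness_namig : String × String := ("abca", "acba")

def Spec_namig (resitev : String) (poskus : String) (out : String) : Prop := out = namig_alt resitev poskus
instance (resitev : String) (poskus : String) (out : String) : Decidable (Spec_namig resitev poskus out) := by unfold Spec_namig; infer_instance

-- ===== CLAIM (what is proved, stated in full; the proofs are below) =====
def Claim_equal_namig : Prop := ∀ (resitev : String) (poskus : String), Dom_namig resitev poskus → Pre_namig resitev poskus → Spec_namig resitev poskus (namig resitev poskus)

-- ===== LEMMAS AND PROOFS =====

-- the per-position classification, with the full solution list r in scope for the membership test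
def pvClassify (r : List Char) (ab : Char × Char) : Char :=
  if ab.1 = ab.2 then 'P'
  else if PySem.Chars.isIn [ab.2] r then 'N'
  else 'X'

-- A's index loop builds exactly the classification of the zipped pair list
theorem pv_hintA_eq (r p : List Char) (h : r.length ≤ p.length) :
    (PySem.List.pyRange 0 r.length 1).foldl (fun acc n =>
      if PySem.List.pyGetD r n ' ' = PySem.List.pyGetD p n ' ' then acc ++ ['P']
      else if PySem.Chars.isIn [PySem.List.pyGetD p n ' '] r
              ∧ PySem.List.pyGetD r n ' ' ≠ PySem.List.pyGetD p n ' ' then acc ++ ['N']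
      else acc ++ ['X']) []
    = (r.zip p).map (pvClassify r) := by
  have hbody : (fun (acc : List Char) (n : Int) =>
      if PySem.List.pyGetD r n ' ' = PySem.List.pyGetD p n ' ' then acc ++ ['P']
      else if PySem.Chars.isIn [PySem.List.pyGetD p n ' '] r
              ∧ PySem.List.pyGetD r n ' ' ≠ PySem.List.pyGetD p n ' ' then acc ++ ['N']
      else acc ++ ['X'])
      = (fun acc n => acc ++ [if PySem.List.pyGetD r n ' ' = PySem.List.pyGetD p n ' ' then 'P'
          else if PySem.Chars.isIn [PySem.List.pyGetD p n ' '] r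
              ∧ PySem.List.pyGetD r n ' ' ≠ PySem.List.pyGetD p n ' ' then 'N' else 'X']) := by
    funext acc n; split_ifs <;> rfl
  rw [hbody, PySem.List.foldl_append_singleton_eq_map, PySem.List.pyRange_one]
  simp only [List.nil_append, List.map_map, Int.sub_zero, Int.toNat_natCast]
  apply List.ext_getElem
  · simp [List.length_zip]; omega
  · intro k hk1 hk2
    have hkr : k < r.length := by
      simp only [List.length_map, List.length_zip] at hk2; omega
    have hkp : k < p.length := by omega
    simp only [List.getElem_map, Function.comp_apply, List.getElem_range, List.getElem_zip, zero_add]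
    have h1 : PySem.List.pyGetD r ((k : Int)) ' ' = r[k] := by
      simp [PySem.List.pyGetD_natCast, List.getD, hkr]
    have h2 : PySem.List.pyGetD p ((k : Int)) ' ' = p[k] := by
      simp [PySem.List.pyGetD_natCast, List.getD, hkp]
    rw [h1, h2]
    unfold pvClassify
    by_cases he : r[k] = p[k] <;> simp [he]

-- B's counter fold counts the occurrences of 'P','N','X' in the classification list
theorem pv_counts_eq (r : List Char) (zs : List (Char × Char)) (a b c : Nat) :
    zs.foldl (fun (acc : Nat × Nat × Nat) ab =>
      if ab.1 = ab.2 then (acc.1 + 1, acc.2.1, acc.2.2)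
      else if PySem.Chars.isIn [ab.2] r then (acc.1, acc.2.1 + 1, acc.2.2)
      else (acc.1, acc.2.1, acc.2.2 + 1)) (a, b, c)
    = (a + (zs.map (pvClassify r)).count 'P',
       b + (zs.map (pvClassify r)).count 'N',
       c + (zs.map (pvClassify r)).count 'X') := by
  induction zs generalizing a b c with
  | nil => simp
  | cons ab zs ih =>
    simp only [List.foldl_cons, List.map_cons]
    by_cases h1 : ab.1 = ab.2
    · have hc : pvClassify r ab = 'P' := by simp [pvClassify, h1]
      rw [if_pos h1, ih, hc, List.count_cons_self,
        List.count_cons_of_ne (by decide), List.count_cons_of_ne (by decide)]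
      simp only [Prod.mk.injEq, and_true]
      omega
    · by_cases h2 : PySem.Chars.isIn [ab.2] r
      · have hc : pvClassify r ab = 'N' := by simp [pvClassify, h1, h2]
        rw [if_neg h1, if_pos h2, ih, hc, List.count_cons_self,
          List.count_cons_of_ne (by decide), List.count_cons_of_ne (by decide)]
        simp only [Prod.mk.injEq, and_true, true_and]
        omega
      · have hc : pvClassify r ab = 'X' := by simp [pvClassify, h1, h2]
        rw [if_neg h1, if_neg h2, ih, hc, List.count_cons_self,
          List.count_cons_of_ne (by decide), List.count_cons_of_ne (by decide)]
        simp only [Prod.mk.injEq, true_and]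
        omega

-- sorting a list over the alphabet {'N','P','X'} yields the three runs in order N < P < X
theorem pv_sorted_eq (hs : List Char) (hmem : ∀ x ∈ hs, x = 'P' ∨ x = 'N' ∨ x = 'X') :
    PySem.List.sorted hs (fun c => c) false
    = List.replicate (hs.count 'N') 'N' ++ List.replicate (hs.count 'P') 'P'
        ++ List.replicate (hs.count 'X') 'X' := by
  apply PySem.List.sorted_id_eq_of_perm_of_pairwise
  · rw [List.perm_iff_count]
    intro x
    by_cases hN : x = 'N'
    · simp [hN, List.count_append, List.count_replicate]
    by_cases hP : x = 'P'
    · simp [hP, List.count_append, List.count_replicate]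
    by_cases hX : x = 'X'
    · simp [hX, List.count_append, List.count_replicate]
    have hxs : x ∉ hs := fun hx => by rcases hmem x hx with h|h|h <;> simp_all
    simp only [List.count_append, List.count_replicate, List.count_eq_zero.mpr hxs, beq_iff_eq]
    split_ifs <;>
      first
        | rfl
        | exact absurd ‹'N' = x›.symm hN
        | exact absurd ‹'P' = x›.symm hP
        | exact absurd ‹'X' = x›.symm hX
  · refine List.pairwise_append.mpr ⟨List.pairwise_append.mpr ⟨?_, ?_, ?_⟩, ?_, ?_⟩
    · exact List.pairwise_replicate.mpr (Or.inr (le_refl _))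
    · exact List.pairwise_replicate.mpr (Or.inr (le_refl _))
    · intro x hx y hy
      rw [(List.eq_of_mem_replicate hx : x = 'N'), (List.eq_of_mem_replicate hy : y = 'P')]
      decide
    · exact List.pairwise_replicate.mpr (Or.inr (le_refl _))
    · intro x hx y hy
      rw [List.mem_append] at hx
      rw [(List.eq_of_mem_replicate hy : y = 'X')]
      rcases hx with hx|hx <;> rw [List.eq_of_mem_replicate hx] <;> decide

-- ===== VERDICT (by name: the statement is the Claim_ definition above) =====
theorem namig_spec : Claim_equal_namig := by
  intro resitev poskus _ hpre
  unfold Spec_namig namig namig_alt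
  dsimp only
  rw [pv_hintA_eq _ _ hpre, pv_counts_eq, pv_sorted_eq]
  · simp
  · intro x hx
    simp only [List.mem_map] at hx
    obtain ⟨ab, -, rfl⟩ := hx
    unfold pvClassify
    split_ifs <;> simp
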